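/- CARRIED OVER by tools/port_base_units.py (renaming only) from proofs.vorbis/Vorbis/Spec/Units, GENERATED there by farm/mkstatement.py from design/units.tsv (unit `swap_bytes`) and the Specs of Vorbis/Spec/*.lean — do not edit.
   THE STATEMENT of the proof unit `swap_bytes`: the function `swap_bytes` (34 instructions) satisfies its contract,
   given the contracts of its callees. What the names mean: Vorbis/Spec/Basic.lean. The theorem to prove:
   `theorem swap_bytes_ok : ProgX.Base.Spec.swap_bytes.Statement`. -/
import ProgX.Base.Spec.LibcSort
namespace ProgX.Base.Spec.swap_bytes
open X86 X86.User Asan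

/-- The statement of unit `swap_bytes`. -/
def Statement : Prop :=
  ∀ (Lay : Layout) (_hLay : Lay.hi = 0x1000000) (μ : Microarch) (_hμ : UserX.MicroOK μ) (u₀ : State)
    (_hcode : HasCodeNat Lay u₀ ProgX.Base.L.swap_bytes.entry ProgX.Base.Code.code_swap_bytes.nat ProgX.Base.L.swap_bytes.size)
    (_h_asan_load1_noabort : Asan.SmallCheck Lay μ ProgX.Base.WayInv (ProgX.Base.CodeOK u₀) [.rax, .rdx] 1 ProgX.Base.L.__asan_load1_noabort.entry),
    ∀ (others : List Obj) (frames : List (Nat × FrameLayout)), Calls Lay μ ProgX.Base.WayInv (ProgX.Base.conv u₀) ProgX.Base.L.swap_bytes.entry (ProgX.Base.Spec.swap_bytes.spec others frames)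

end ProgX.Base.Spec.swap_bytes
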